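-- pv_equiv track=rewrite | github.com/Borschik27/SSH-Command-Executor | app/ssh_config_parser.py | _parse_content
-- ===== SOURCE A (Python) =====
-- from typing import Dict, List, Optional
--
-- def _parse_content(content: str) -> Dict[str, Dict[str, str]]:
--     hosts: Dict[str, Dict[str, str]] = {}
--     current_hosts: List[str] = []
--
--     for line in content.split('\n'):
--         line = line.strip()
--
--         # Пропускаем пустые строки и комментарии
--         if not line or line.startswith('#'):
--             continue
--
--         # Обработка Host директивы
--         if line.lower().startswith('host '):
--             host_names = line[5:].split()
--             current_hosts = host_names
--             for alias in host_names:
--                 hosts[alias] = {'Host': alias}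
--             continue
--
--         # Обработка других директив
--         if current_hosts and ' ' in line:
--             parts = line.split(None, 1)
--             if len(parts) == 2:
--                 key, value = parts
--                 key_lower = key.lower()
--                 for alias in current_hosts:
--                     hosts[alias][key_lower] = value
--
--     return hosts
-- ===== SOURCE B (Python) =====
-- def _parse_content(content: str):
--     # Pass 1: segment the lines into Host blocks (aliases, directive lines);
--     # lines before the first Host line are discarded.
--     blocks = []
--     for raw in content.split('\n'):
--         line = raw.strip()
--         if not line or line.startswith('#'):
--             continue
--         if line.lower().startswith('host '):
--             blocks.append((line[5:].split(), []))
--         elif blocks: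
--             blocks[-1][1].append(line)
--
--     # Pass 2: build each block's directive list once, then emit one dict per alias.
--     hosts = {}
--     for aliases, dlines in blocks:
--         pairs = []
--         for line in dlines:
--             if ' ' in line:
--                 parts = line.split(None, 1)
--                 if len(parts) == 2:
--                     key, value = parts
--                     pairs.append((key.lower(), value))
--         for alias in aliases:
--             entry = {'Host': alias}
--             for k, v in pairs:
--                 entry[k] = v
--             hosts[alias] = entry
--     return hosts
-- ===== Notes on version B (the rewrite author's own statement) =====
-- stated objective: alternative
-- what changed: Replaces A's single interleaved stateful pass (current_hosts mutated while host dicts are updated in place) by a two-phase decomposition: first segment the lines into Host blocks, then build each block's directive list once and emit one complete dict per alias.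
import Mathlib
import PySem

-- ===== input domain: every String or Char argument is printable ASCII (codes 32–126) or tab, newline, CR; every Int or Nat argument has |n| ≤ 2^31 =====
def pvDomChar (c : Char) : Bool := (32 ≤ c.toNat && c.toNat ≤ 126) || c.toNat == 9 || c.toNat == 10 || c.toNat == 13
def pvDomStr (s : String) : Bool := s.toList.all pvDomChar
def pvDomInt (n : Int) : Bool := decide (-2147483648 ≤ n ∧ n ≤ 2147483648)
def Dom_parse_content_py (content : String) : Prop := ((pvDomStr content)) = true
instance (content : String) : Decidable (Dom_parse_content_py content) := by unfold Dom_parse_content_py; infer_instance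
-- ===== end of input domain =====

-- B replaces A's single interleaved stateful pass by a two-phase decomposition (segment into Host
-- blocks, then build each block's directive list once and emit one complete dict per alias);
-- same cost, objective: alternative structure.

-- ===== PORT A =====
-- one iteration of A's `for line in content.split('\n')` loop; state = (hosts, current_hosts)
def pcStepA (st : PySem.Dict String (PySem.Dict String String) × List String) (raw : String) :
    PySem.Dict String (PySem.Dict String String) × List String :=
  let line := PySem.Str.strip raw
  if line == "" || PySem.Str.startswith line "#" then st
  else if PySem.Str.startswith (PySem.Str.lower line) "host " then
    let host_names := PySem.Str.split₀ (PySem.Str.slice line (some 5) none)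
    (host_names.foldl (fun h a => h.insert a ((PySem.Dict.empty : PySem.Dict String String).insert "Host" a)) st.1,
     host_names)
  else if !st.2.isEmpty && PySem.Str.isIn " " line then
    -- `parts = line.split(None, 1); if len(parts) == 2: key, value = parts`
    match PySem.Str.split₀Max line 1 with
    | [key, value] =>
      let key_lower := PySem.Str.lower key
      (st.2.foldl (fun h a => h.modify a PySem.Dict.empty (fun d => d.insert key_lower value)) st.1, st.2)
    | _ => st
  else st

def parse_content_py (content : String) : List (String × List (String × String)) :=
  -- content.split('\n'): split? is `some` since the separator is non-empty
  let lines := (PySem.Str.split? content "\n").getD []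
  let st := lines.foldl pcStepA ((PySem.Dict.empty : PySem.Dict String (PySem.Dict String String)), ([] : List String))
  st.1.items.map (fun p => (p.1, p.2.items))

-- ===== PORT B =====
-- pass 1: segment the lines into blocks (aliases, directive lines)
def pcSegStep (bs : List (List String × List String)) (raw : String) : List (List String × List String) :=
  let line := PySem.Str.strip raw
  if line == "" || PySem.Str.startswith line "#" then bs
  else if PySem.Str.startswith (PySem.Str.lower line) "host " then
    bs ++ [(PySem.Str.split₀ (PySem.Str.slice line (some 5) none), [])]
  else
    -- `elif blocks: blocks[-1][1].append(line)`
    match bs.getLast? with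
    | some b => bs.dropLast ++ [(b.1, b.2 ++ [line])]
    | none => bs

-- a block's directive lines parsed once into (key.lower(), value) pairs
def pcPairs (dlines : List String) : List (String × String) :=
  dlines.foldl (fun acc line =>
    if PySem.Str.isIn " " line then
      match PySem.Str.split₀Max line 1 with
      | [key, value] => acc ++ [(PySem.Str.lower key, value)]
      | _ => acc
    else acc) []

-- pass 2, one block: emit one complete dict per alias
def pcApplyBlock (h : PySem.Dict String (PySem.Dict String String))
    (b : List String × List String) : PySem.Dict String (PySem.Dict String String) :=
  let pairs := pcPairs b.2
  b.1.foldl (fun h a =>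
    h.insert a (pairs.foldl (fun d p => d.insert p.1 p.2)
      ((PySem.Dict.empty : PySem.Dict String String).insert "Host" a))) h

def parse_content_py_alt (content : String) : List (String × List (String × String)) :=
  let lines := (PySem.Str.split? content "\n").getD []
  let blocks := lines.foldl pcSegStep []
  let hosts := blocks.foldl pcApplyBlock (PySem.Dict.empty : PySem.Dict String (PySem.Dict String String))
  hosts.items.map (fun p => (p.1, p.2.items))

-- ===== PRECONDITION & SPEC =====
def Spec_parse_content_py (content : String) (out : List (String × List (String × String))) : Prop := out = parse_content_py_alt content
instance (content : String) (out : List (String × List (String × String))) : Decidable (Spec_parse_content_py content out) := by unfold Spec_parse_content_py; infer_instance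

-- ===== CLAIM (what is proved, stated in full; the proofs are below) =====
def Claim_equal_parse_content_py : Prop := ∀ (content : String), Dom_parse_content_py content → Spec_parse_content_py content (parse_content_py content)

-- ===== LEMMAS AND PROOFS =====

-- B's hosts dict built from the first `bs` blocks, and the aliases of the last block
def pcApplyAll (bs : List (List String × List String)) : PySem.Dict String (PySem.Dict String String) :=
  bs.foldl pcApplyBlock (PySem.Dict.empty : PySem.Dict String (PySem.Dict String String))

def pcLastAl (bs : List (List String × List String)) : List String :=
  ((bs.getLast?).map (·.1)).getD []

lemma pcSet_update_eq_self {l : List String} : ∀ {s : PySem.Set String}, (∀ x ∈ l, x ∈ s) → PySem.Set.update s l = s := by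
  induction l with
  | nil => intro s _; exact PySem.Set.update_nil s
  | cons a l ih =>
    intro s h
    show List.foldl PySem.Set.add (s.add a) l = s
    rw [PySem.Set.add_of_mem (h a (List.mem_cons_self))]
    exact ih (fun x hx => h x (List.mem_cons_of_mem _ hx))

lemma pcSet_update_idem (s : PySem.Set String) (l : List String) :
    PySem.Set.update (PySem.Set.update s l) l = PySem.Set.update s l :=
  pcSet_update_eq_self (fun x hx => (PySem.Set.mem_update s l x).2 (Or.inr hx))

lemma pcInsFold_getD (g : String → PySem.Dict String String) :
    ∀ (al : List String) (h : PySem.Dict String (PySem.Dict String String)) (k : String),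
      (al.foldl (fun h a => h.insert a (g a)) h).getD k PySem.Dict.empty
        = if k ∈ al then g k else h.getD k PySem.Dict.empty := by
  intro al
  induction al with
  | nil => intro h k; simp
  | cons a al ih =>
    intro h k
    rw [List.foldl_cons, ih]
    by_cases hal : k ∈ al
    · simp [hal]
    · by_cases hka : k = a <;> simp [hal, hka, PySem.Dict.getD_insert]

lemma pcModFold_getD (kl v : String) :
    ∀ (al : List String) (h : PySem.Dict String (PySem.Dict String String)) (k : String),
      (al.foldl (fun h a => h.modify a PySem.Dict.empty (fun d => d.insert kl v)) h).getD k PySem.Dict.empty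
        = if k ∈ al then (h.getD k PySem.Dict.empty).insert kl v else h.getD k PySem.Dict.empty := by
  intro al
  induction al with
  | nil => intro h k; simp
  | cons a al ih =>
    intro h k
    rw [List.foldl_cons, ih]
    by_cases hal : k ∈ al <;> by_cases hka : k = a <;>
      simp [hal, hka, PySem.Dict.getD_modify, PySem.Dict.insert_insert_self]

lemma pcNodup_modFold (kl v : String) (al : List String) (h : PySem.Dict String (PySem.Dict String String))
    (hnd : h.keys.Nodup) :
    (al.foldl (fun h a => h.modify a PySem.Dict.empty (fun d => d.insert kl v)) h).keys.Nodup := by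
  rw [PySem.Dict.keys_foldl_modify al PySem.Dict.empty (fun _ _ d => d.insert kl v) h]
  exact PySem.Set.nodup_update _ _ hnd

-- the heart: updating every alias after inserting its fresh dict = inserting the updated dict
lemma pcModFold_insFold (al : List String) (h : PySem.Dict String (PySem.Dict String String))
    (hnd : h.keys.Nodup) (g : String → PySem.Dict String String) (kl v : String) :
    al.foldl (fun h a => h.modify a PySem.Dict.empty (fun d => d.insert kl v))
        (al.foldl (fun h a => h.insert a (g a)) h)
      = al.foldl (fun h a => h.insert a ((g a).insert kl v)) h := by
  have nd1 : (al.foldl (fun h a => h.insert a (g a)) h).keys.Nodup :=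
    PySem.Dict.nodup_keys_foldl_insert al (fun _ a => g a) h hnd
  have nd2 := pcNodup_modFold kl v al _ nd1
  have nd3 : (al.foldl (fun h a => h.insert a ((g a).insert kl v)) h).keys.Nodup :=
    PySem.Dict.nodup_keys_foldl_insert al (fun _ a => (g a).insert kl v) h hnd
  have hkeys : (al.foldl (fun h a => h.modify a PySem.Dict.empty (fun d => d.insert kl v))
      (al.foldl (fun h a => h.insert a (g a)) h)).keys
      = (al.foldl (fun h a => h.insert a ((g a).insert kl v)) h).keys := by
    rw [PySem.Dict.keys_foldl_modify al PySem.Dict.empty (fun _ _ d => d.insert kl v),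
      PySem.Dict.keys_foldl_insert al (fun _ a => g a) h,
      PySem.Dict.keys_foldl_insert al (fun _ a => (g a).insert kl v) h,
      pcSet_update_idem]
  apply PySem.Dict.ext
  rw [PySem.Dict.items_eq_map_keys _ nd2 PySem.Dict.empty,
    PySem.Dict.items_eq_map_keys _ nd3 PySem.Dict.empty, hkeys]
  apply List.map_congr_left
  intro k _
  rw [pcModFold_getD, pcInsFold_getD, pcInsFold_getD]
  by_cases hal : k ∈ al <;> simp [hal]

lemma pcNodup_applyBlock (h : PySem.Dict String (PySem.Dict String String))
    (b : List String × List String) (hnd : h.keys.Nodup) : (pcApplyBlock h b).keys.Nodup :=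
  PySem.Dict.nodup_keys_foldl_insert b.1 _ h hnd

lemma pcNodup_applyAll : ∀ (bs : List (List String × List String)), (pcApplyAll bs).keys.Nodup := by
  suffices h : ∀ (bs : List (List String × List String)) (d : PySem.Dict String (PySem.Dict String String)),
      d.keys.Nodup → (bs.foldl pcApplyBlock d).keys.Nodup by
    intro bs; exact h bs _ PySem.Dict.nodup_keys_empty
  intro bs
  induction bs with
  | nil => intro d hd; exact hd
  | cons b bs ih => intro d hd; exact ih _ (pcNodup_applyBlock d b hd)

lemma pcApplyAll_concat (bs : List (List String × List String)) (b : List String × List String) :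
    pcApplyAll (bs ++ [b]) = pcApplyBlock (pcApplyAll bs) b := by
  simp [pcApplyAll, List.foldl_append]

lemma pcLastAl_concat (bs : List (List String × List String)) (b : List String × List String) :
    pcLastAl (bs ++ [b]) = b.1 := by
  simp [pcLastAl]

-- a line that is not a well-formed directive leaves a block's pairs, hence its effect, unchanged
lemma pcPairs_concat_unchanged (dl : List String) (l : String)
    (hl : PySem.Str.isIn " " l = false ∨ (∀ k v, PySem.Str.split₀Max l 1 ≠ [k, v])) :
    pcPairs (dl ++ [l]) = pcPairs dl := by
  unfold pcPairs
  rw [List.foldl_append, List.foldl_cons, List.foldl_nil]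
  rcases hl with hl | hm
  · rw [hl]; simp
  · by_cases hi : PySem.Str.isIn " " l = true
    · rw [if_pos hi]
      rcases hsp : PySem.Str.split₀Max l 1 with _ | ⟨k, _ | ⟨v, _ | _⟩⟩ <;>
        first
          | rfl
          | exact absurd hsp (hm _ _)
    · rw [if_neg hi]

lemma pcApplyBlock_concat_unchanged (h : PySem.Dict String (PySem.Dict String String))
    (al dl : List String) (l : String)
    (hl : PySem.Str.isIn " " l = false ∨ (∀ k v, PySem.Str.split₀Max l 1 ≠ [k, v])) :
    pcApplyBlock h (al, dl ++ [l]) = pcApplyBlock h (al, dl) := by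
  simp only [pcApplyBlock, pcPairs_concat_unchanged dl l hl]

-- a block with no aliases contributes nothing
lemma pcApplyBlock_nil_aliases (h : PySem.Dict String (PySem.Dict String String))
    (b : List String × List String) (hb : b.1 = []) : pcApplyBlock h b = h := by
  simp [pcApplyBlock, hb]

-- one line commutes with the segment-then-apply view
lemma pcStep_comm (bs : List (List String × List String)) (raw : String) :
    pcStepA (pcApplyAll bs, pcLastAl bs) raw
      = (pcApplyAll (pcSegStep bs raw), pcLastAl (pcSegStep bs raw)) := by
  simp only [pcStepA, pcSegStep]
  by_cases h1 : (PySem.Str.strip raw == "" || PySem.Str.startswith (PySem.Str.strip raw) "#") = true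
  · rw [if_pos h1, if_pos h1]
  · rw [if_neg h1, if_neg h1]
    by_cases h2 : PySem.Str.startswith (PySem.Str.lower (PySem.Str.strip raw)) "host " = true
    · rw [if_pos h2, if_pos h2, pcApplyAll_concat, pcLastAl_concat]
      simp [pcApplyBlock, pcPairs]
    · rw [if_neg h2, if_neg h2]
      rcases List.eq_nil_or_concat bs with rfl | ⟨bs', b, rfl⟩
      · simp [pcLastAl]
      · rw [List.concat_eq_append, List.getLast?_concat, List.dropLast_concat]
        simp only [pcLastAl_concat, pcApplyAll_concat]
        by_cases h3 : (!b.1.isEmpty && PySem.Str.isIn " " (PySem.Str.strip raw)) = true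
        · rw [if_pos h3]
          have h4 : PySem.Str.isIn " " (PySem.Str.strip raw) = true := by
            cases hx : PySem.Str.isIn " " (PySem.Str.strip raw)
            · rw [hx] at h3; simp at h3
            · rfl
          rcases hm : PySem.Str.split₀Max (PySem.Str.strip raw) 1 with _ | ⟨k, _ | ⟨v, _ | _⟩⟩
          · exact congrArg (fun d => (d, b.1))
              (pcApplyBlock_concat_unchanged _ b.1 b.2 _ (Or.inr (by simp [hm]))).symm
          · exact congrArg (fun d => (d, b.1))
              (pcApplyBlock_concat_unchanged _ b.1 b.2 _ (Or.inr (by simp [hm]))).symm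
          · -- the well-formed directive: use the mod-after-insert = insert-updated lemma
            have hp : pcPairs (b.2 ++ [PySem.Str.strip raw])
                = pcPairs b.2 ++ [(PySem.Str.lower k, v)] := by
              unfold pcPairs
              rw [List.foldl_append, List.foldl_cons, List.foldl_nil, if_pos h4, hm]
            simp only [pcApplyBlock, hp, List.foldl_append, List.foldl_cons, List.foldl_nil]
            rw [pcModFold_insFold b.1 (pcApplyAll bs') (pcNodup_applyAll bs')
              (fun a => List.foldl (fun d p => d.insert p.1 p.2)
                (PySem.Dict.empty.insert "Host" a) (pcPairs b.2)) (PySem.Str.lower k) v]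
          · exact congrArg (fun d => (d, b.1))
              (pcApplyBlock_concat_unchanged _ b.1 b.2 _ (Or.inr (by simp [hm]))).symm
        · rw [if_neg h3]
          by_cases hb1 : b.1 = []
          · rw [pcApplyBlock_nil_aliases _ _ hb1,
              pcApplyBlock_nil_aliases _ (b.1, b.2 ++ [PySem.Str.strip raw]) hb1]
          · have h4 : PySem.Str.isIn " " (PySem.Str.strip raw) = false := by
              cases hx : PySem.Str.isIn " " (PySem.Str.strip raw)
              · rfl
              · exfalso; apply h3; rw [hx]
                cases hy : b.1.isEmpty
                · rfl
                · exact absurd (List.isEmpty_iff.mp hy) hb1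
            exact congrArg (fun d => (d, b.1))
              (pcApplyBlock_concat_unchanged _ b.1 b.2 _ (Or.inl h4)).symm

lemma pcMain (ls : List String) : ∀ (bs : List (List String × List String)),
    ls.foldl pcStepA (pcApplyAll bs, pcLastAl bs)
      = (pcApplyAll (ls.foldl pcSegStep bs), pcLastAl (ls.foldl pcSegStep bs)) := by
  induction ls with
  | nil => intro bs; rfl
  | cons l ls ih =>
    intro bs
    rw [List.foldl_cons, List.foldl_cons, pcStep_comm]
    exact ih (pcSegStep bs l)

-- ===== VERDICT (by name: the statement is the Claim_ definition above) =====
theorem parse_content_py_spec : Claim_equal_parse_content_py := by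
  intro content _
  unfold Spec_parse_content_py parse_content_py parse_content_py_alt
  have h := pcMain ((PySem.Str.split? content "\n").getD []) []
  simp only [pcApplyAll, pcLastAl, List.foldl_nil, List.getLast?_nil, Option.map_none,
    Option.getD_none] at h
  simp only [h]
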